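-- pv_equiv track=rewrite | github.com/Ashiq-am/Path-of-Python | 3.Data Types/Arrays Set 1 and Set 2/Prefix Sum/Find the final String by incrementing prefixes of given length/Find the final String by incrementing prefixes of given length.py | findRollOut
-- ===== SOURCE A (Python) =====
-- def findRollOut(s, a, n):
--     s = list(s);
--     # Initialize an array of size
--     # N+1 and make it to 0
--     arr = [0] * (n + 1);
--
--     # Increment arr[0] by 1 and
--     # decrement arr[a[i] by 1
--     for i in range(n):
--         arr[a[i]] -= 1;
--         arr[0] += 1;
--
--     # Make prefix array
--     for i in range(1, n):
--         arr[i] += arr[i - 1];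
--
--     # Increment the characters
--     for i in range(n):
--         arr[i] = (arr[i]) % 26;
--
--         if (arr[i] + ord(s[i]) > ord('z')):
--             s[i] = chr(ord(s[i]) + arr[i] - 26);
--         else:
--             s[i] = chr(ord(s[i]) + arr[i]);
--
--     s = "".join(s);
--     return s;
-- ===== SOURCE B (Python) =====
-- def findRollOut(s, a, n):
--     if n <= 0:
--         return s
--     # how many of the n operations cover each position
--     counts = [0] * n
--     for L in a[:n]:
--         for j in range(L):
--             counts[j] += 1
--     out = []
--     for i in range(n):
--         c = ord(s[i]) + counts[i] % 26
--         out.append(chr(c if c <= ord('z') else c - 26))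
--     return "".join(out) + s[n:]
-- ===== Notes on version B (the rewrite author's own statement) =====
-- stated objective: alternative
-- what changed: Replaces A's +1/-1 difference array and in-place prefix-sum pass with a counts array built by directly bumping every position of each operation's prefix, then builds the output string afresh; Pre_ excludes negative operation lengths, a corner where A's value comes from Python negative indexing into its internal difference array and B's empty-prefix reading is equally defensible.
-- outside the precondition, e.g. on findRollOut('ab', [-1, 0], 2): A returns 'bc', B returns 'ab'
import Mathlib
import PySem

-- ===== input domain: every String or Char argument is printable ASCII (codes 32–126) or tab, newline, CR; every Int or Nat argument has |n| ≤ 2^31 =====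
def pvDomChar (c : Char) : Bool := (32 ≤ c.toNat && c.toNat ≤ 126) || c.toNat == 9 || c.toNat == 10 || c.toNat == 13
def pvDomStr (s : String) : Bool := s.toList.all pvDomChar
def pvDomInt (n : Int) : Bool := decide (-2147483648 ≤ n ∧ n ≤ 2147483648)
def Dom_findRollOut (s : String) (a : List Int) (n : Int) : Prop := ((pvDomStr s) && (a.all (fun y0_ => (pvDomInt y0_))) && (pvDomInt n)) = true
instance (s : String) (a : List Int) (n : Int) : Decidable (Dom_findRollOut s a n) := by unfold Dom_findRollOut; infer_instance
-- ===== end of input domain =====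

-- B replaces A's difference-array/prefix-sum with direct per-prefix counting
-- (objective: alternative decomposition, not faster).

-- ===== PORT A =====
-- ord/chr are ported by hand as Char.toNat / Char.ofNat: exact here, every code point
-- reached stays below the surrogate range (inputs are ASCII, increments are < 26).
-- The three loop bodies are named helpers; each is the literal body of A's loop.

-- for i in range(n): arr[a[i]] -= 1; arr[0] += 1
def pvBody1 (a : List Int) (arr : List Int) (i : Int) : List Int :=
  let ai := PySem.List.pyGetD a i 0
  let arr1 := PySem.List.pySetD arr ai (PySem.List.pyGetD arr ai 0 - 1)
  PySem.List.pySetD arr1 0 (PySem.List.pyGetD arr1 0 0 + 1)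

-- for i in range(1, n): arr[i] += arr[i - 1]
def pvBody2 (arr : List Int) (i : Int) : List Int :=
  PySem.List.pySetD arr i (PySem.List.pyGetD arr i 0 + PySem.List.pyGetD arr (i - 1) 0)

-- for i in range(n): arr[i] %= 26; s[i] = chr(ord(s[i]) + arr[i] [- 26])
def pvBody3 (st : List Int × List Char) (i : Int) : List Int × List Char :=
  let arr := st.1
  let cs := st.2
  let v := PySem.Int.mod (PySem.List.pyGetD arr i 0) 26
  let arr := PySem.List.pySetD arr i v
  let ci := PySem.List.pyGetD cs i ' '
  let cs := if v + (ci.toNat : Int) > 122 then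
      PySem.List.pySetD cs i (Char.ofNat ((ci.toNat : Int) + v - 26).toNat)
    else
      PySem.List.pySetD cs i (Char.ofNat ((ci.toNat : Int) + v).toNat)
  (arr, cs)

def findRollOut (s : String) (a : List Int) (n : Int) : String :=
  -- s = list(s)
  let cs := s.toList
  -- arr = [0] * (n + 1)
  let arr : List Int := List.replicate (n + 1).toNat 0
  let arr := (PySem.List.pyRange 0 n).foldl (pvBody1 a) arr
  let arr := (PySem.List.pyRange 1 n).foldl pvBody2 arr
  let st := (PySem.List.pyRange 0 n).foldl pvBody3 (arr, cs)
  -- return "".join(s)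
  String.ofList st.2

-- ===== PORT B =====
-- counts[j] += 1
def pvInc (cnt : List Int) (j : Int) : List Int :=
  PySem.List.pySetD cnt j (PySem.List.pyGetD cnt j 0 + 1)

-- for j in range(L): counts[j] += 1
def pvCover (cnt : List Int) (L : Int) : List Int :=
  (PySem.List.pyRange 0 L).foldl pvInc cnt

def findRollOut_alt (s : String) (a : List Int) (n : Int) : String :=
  if n ≤ 0 then s
  else
    -- counts = [0] * n
    let counts : List Int := List.replicate n.toNat 0
    -- for L in a[:n]: for j in range(L): counts[j] += 1
    let counts := (PySem.List.slice a none (some n)).foldl pvCover counts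
    -- out = []; for i in range(n): c = ord(s[i]) + counts[i] % 26; out.append(...)
    -- c = ord(s[i]) + counts[i] % 26, written inline
    let out := (PySem.List.pyRange 0 n).foldl (fun out i =>
      out ++ [if ((PySem.List.pyGetD s.toList i ' ').toNat : Int)
                 + PySem.Int.mod (PySem.List.pyGetD counts i 0) 26 ≤ 122 then
          Char.ofNat (((PySem.List.pyGetD s.toList i ' ').toNat : Int)
                 + PySem.Int.mod (PySem.List.pyGetD counts i 0) 26).toNat
        else
          Char.ofNat (((PySem.List.pyGetD s.toList i ' ').toNat : Int)
                 + PySem.Int.mod (PySem.List.pyGetD counts i 0) 26 - 26).toNat])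
      ([] : List Char)
    -- return "".join(out) + s[n:]
    String.ofList (out ++ PySem.List.slice s.toList (some n) none)

-- ===== PRECONDITION & SPEC =====
-- Pre_ requires, besides the inputs where A raises no IndexError (string and op list
-- reaching index n-1, ops valid indices into the length-(n+1) array), that the first n
-- operation lengths are nonnegative: on a negative length A's value comes from Python
-- negative indexing into its internal difference array and B's empty-prefix reading is
-- equally defensible, so that corner is excluded.
def Pre_findRollOut (s : String) (a : List Int) (n : Int) : Prop :=
  n ≤ (a.length : Int) ∧ n ≤ (s.toList.length : Int) ∧
    ∀ x ∈ a.take n.toNat, 0 ≤ x ∧ x ≤ n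
instance (s : String) (a : List Int) (n : Int) : Decidable (Pre_findRollOut s a n) := by
  unfold Pre_findRollOut; infer_instance
def pvWitness_findRollOut : String × List Int × Int := ("ab", [1, 2], 2)

def Spec_findRollOut (s : String) (a : List Int) (n : Int) (out : String) : Prop := out = findRollOut_alt s a n
instance (s : String) (a : List Int) (n : Int) (out : String) : Decidable (Spec_findRollOut s a n out) := by unfold Spec_findRollOut; infer_instance

-- ===== CLAIM (what is proved, stated in full; the proofs are below) =====
def Claim_equal_findRollOut : Prop := ∀ (s : String) (a : List Int) (n : Int), Dom_findRollOut s a n → Pre_findRollOut s a n → Spec_findRollOut s a n (findRollOut s a n)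

-- ===== LEMMAS AND PROOFS =====

-- the Python index into the length-m array that index x denotes (negative = from the end)
def pvIdx (m : Nat) (x : Int) : Nat := if 0 ≤ x then x.toNat else m - (-x).toNat

-- the effective prefix length of op x under A's negative indexing
def pvEff (n x : Int) : Int := if x < 0 then x + (n + 1) else x

-- the character written at a position receiving total increment v (v already mod 26)
def pvWrap (c : Char) (v : Int) : Char :=
  if v + (c.toNat : Int) > 122 then Char.ofNat ((c.toNat : Int) + v - 26).toNat
  else Char.ofNat ((c.toNat : Int) + v).toNat

-- loop 1's body as a function of the op value itself
def pvStep1 (arr : List Int) (x : Int) : List Int :=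
  let arr1 := PySem.List.pySetD arr x (PySem.List.pyGetD arr x 0 - 1)
  PySem.List.pySetD arr1 0 (PySem.List.pyGetD arr1 0 0 + 1)

-- prefix sums of the first i+1 entries of arr
def pvS (arr : List Int) : Nat → Int
  | 0 => arr.getD 0 0
  | i + 1 => pvS arr i + arr.getD (i + 1) 0

theorem pySetD_eq_set (arr : List Int) (x : Int) (v : Int) (h : PySem.Raise.InRange arr.length x) :
    PySem.List.pySetD arr x v = arr.set (pvIdx arr.length x) v := by
  obtain ⟨h1, h2⟩ := h
  simp [PySem.List.pySetD, PySem.List.pySet?, PySem.List.pyIdx?, pvIdx]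
  split_ifs with g1 <;> simp_all

theorem pyGetD_eq_getD (arr : List Int) (x : Int) (d : Int) (h : PySem.Raise.InRange arr.length x) :
    PySem.List.pyGetD arr x d = arr.getD (pvIdx arr.length x) d := by
  obtain ⟨h1, h2⟩ := h
  simp [PySem.List.pyGetD, PySem.List.pyGet?, PySem.List.pyIdx?, pvIdx]
  split_ifs with g1 <;> simp_all

theorem pvIdx_lt (m : Nat) (x : Int) (h : PySem.Raise.InRange m x) : pvIdx m x < m := by
  obtain ⟨h1, h2⟩ := h; simp [pvIdx]; split_ifs <;> omega

theorem getD_set_lt (l : List Int) (k j : Nat) (v : Int) (hk : k < l.length) :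
    (l.set k v).getD j 0 = if k = j then v else l.getD j 0 := by
  simp [List.getD_eq_getElem?_getD, List.getElem?_set]
  split_ifs with g <;> simp_all

theorem pvStep1_length (arr : List Int) (x : Int) : (pvStep1 arr x).length = arr.length := by
  simp [pvStep1, PySem.List.length_pySetD]

theorem pvStep1_getD (arr : List Int) (x : Int) (j : Nat)
    (hx : PySem.Raise.InRange arr.length x) (h0 : 0 < arr.length) :
    (pvStep1 arr x).getD j 0 =
      arr.getD j 0 - (if pvIdx arr.length x = j then 1 else 0) + (if j = 0 then 1 else 0) := by
  have hk := pvIdx_lt arr.length x hx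
  have h1 : PySem.Raise.InRange arr.length (0 : Int) := ⟨by omega, by exact_mod_cast h0⟩
  unfold pvStep1
  rw [pySetD_eq_set _ _ _ hx, pyGetD_eq_getD _ _ _ hx]
  set k := pvIdx arr.length x with hkdef
  set g := arr.getD k 0 with hgdef
  have hlen : (arr.set k (g - 1)).length = arr.length := by simp
  rw [pySetD_eq_set _ _ _ (by rw [hlen]; exact h1), pyGetD_eq_getD _ _ _ (by rw [hlen]; exact h1)]
  have hidx0 : pvIdx (arr.set k (g - 1)).length (0:Int) = 0 := by simp [pvIdx]
  rw [hidx0]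
  have e1 : (arr.set k (g - 1)).getD 0 0 = if k = 0 then g - 1 else arr.getD 0 0 :=
    getD_set_lt _ _ _ _ (by omega)
  have e2 : ∀ w, ((arr.set k (g - 1)).set 0 w).getD j 0 =
      if 0 = j then w else (arr.set k (g - 1)).getD j 0 := fun w => by
    rw [getD_set_lt _ _ _ _ (by simp; omega)]
  have e3 : (arr.set k (g - 1)).getD j 0 = if k = j then g - 1 else arr.getD j 0 :=
    getD_set_lt _ _ _ _ (by omega)
  rw [e2, e1, e3]
  by_cases hkj : k = j
  · subst hkj
    by_cases hk0 : k = 0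
    · rw [hk0] at hgdef ⊢
      simp only [reduceIte]
      omega
    · have h0k : ¬(0 = k) := fun h => hk0 h.symm
      simp only [reduceIte, if_neg hk0, if_neg h0k]
      omega
  · by_cases hj0 : j = 0
    · subst hj0
      simp only [reduceIte, if_neg hkj]
      omega
    · have h0j : ¬(0 = j) := fun h => hj0 h.symm
      simp only [if_neg hkj, if_neg hj0, if_neg h0j]
      omega

theorem pvL1 (ops : List Int) : ∀ (arr : List Int), (∀ x ∈ ops, PySem.Raise.InRange arr.length x) → 0 < arr.length →
    ∀ j < arr.length, (ops.foldl pvStep1 arr).getD j 0 =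
      arr.getD j 0 + (if j = 0 then (ops.length : Int) else 0)
        - (ops.countP (fun x => pvIdx arr.length x == j) : Int) := by
  induction ops with
  | nil => intro arr _ _ j _; simp
  | cons x t ih =>
    intro arr hin h0 j hj
    have hx := hin x (by simp)
    have hlen : (pvStep1 arr x).length = arr.length := pvStep1_length arr x
    have h2 := ih (pvStep1 arr x) (by intro y hy; rw [hlen]; exact hin y (by simp [hy])) (by omega) j (by omega)
    rw [List.foldl_cons, h2, hlen, pvStep1_getD arr x j hx h0, List.countP_cons]
    simp only [beq_iff_eq, List.length_cons]
    push_cast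
    split_ifs <;> omega

theorem pvFoldl2_length (l : List Int) : ∀ (arr : List Int), (l.foldl pvBody2 arr).length = arr.length := by
  induction l with
  | nil => intro arr; rfl
  | cons y ys ihy =>
    intro arr
    simp only [List.foldl_cons]
    rw [ihy]
    simp [pvBody2, PySem.List.length_pySetD]

theorem pvL2 (arr : List Int) : ∀ (t : Nat), t + 1 < arr.length →
    ∀ i < arr.length, ((PySem.List.pyRange 1 (1 + (t : Int))).foldl pvBody2 arr).getD i 0 =
      if i ≤ t then pvS arr i else arr.getD i 0 := by
  intro t
  induction t with
  | zero =>
    intro _ i _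
    rw [PySem.List.pyRange_one_eq_nil (by omega)]
    simp only [List.foldl_nil]
    split_ifs with h
    · interval_cases i; rfl
    · rfl
  | succ t ih =>
    intro ht i hi
    have h1 : (1 : Int) + ((t + 1 : Nat) : Int) = (1 + (t : Int)) + 1 := by push_cast; ring
    rw [h1, PySem.List.pyRange_one_succ_right (by omega), List.foldl_append, List.foldl_cons,
      List.foldl_nil]
    have hlen : ((PySem.List.pyRange 1 (1 + (t : Int))).foldl pvBody2 arr).length = arr.length :=
      pvFoldl2_length _ arr
    set r := (PySem.List.pyRange 1 (1 + (t : Int))).foldl pvBody2 arr with hrdef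
    have hcast : (1 + (t : Int)) = ((t + 1 : Nat) : Int) := by push_cast; ring
    have hread1 : PySem.List.pyGetD r (1 + (t : Int)) 0 = arr.getD (t + 1) 0 := by
      rw [hcast, PySem.List.pyGetD_natCast, ih (by omega) (t + 1) (by omega)]
      simp
    have hread2 : PySem.List.pyGetD r (1 + (t : Int) - 1) 0 = pvS arr t := by
      have h2 : (1 + (t : Int) - 1) = ((t : Nat) : Int) := by ring
      rw [h2, PySem.List.pyGetD_natCast, ih (by omega) t (by omega)]
      simp
    unfold pvBody2
    rw [hread1, hread2, hcast, PySem.List.pySetD_natCast]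
    rw [getD_set_lt _ _ _ _ (by rw [hlen]; omega), ih (by omega) i hi]
    by_cases hit : t + 1 = i
    · rw [if_pos hit, ← hit, if_pos (le_refl _), pvS]
      ring
    · rw [if_neg hit]
      by_cases hle : i ≤ t
      · rw [if_pos hle, if_pos (by omega)]
      · rw [if_neg hle, if_neg (by omega)]

theorem pvL4 (arr2 : List Int) (cs : List Char) : ∀ (t : Nat), t ≤ arr2.length → t ≤ cs.length →
    (((PySem.List.pyRange 0 (t : Int)).foldl pvBody3 (arr2, cs)).1.length = arr2.length) ∧
    (∀ i, t ≤ i → i < arr2.length →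
      ((PySem.List.pyRange 0 (t : Int)).foldl pvBody3 (arr2, cs)).1.getD i 0 = arr2.getD i 0) ∧
    ((PySem.List.pyRange 0 (t : Int)).foldl pvBody3 (arr2, cs)).2 =
      (List.range t).map (fun i => pvWrap (cs.getD i ' ') (PySem.Int.mod (arr2.getD i 0) 26))
        ++ cs.drop t := by
  intro t
  induction t with
  | zero =>
    intro _ _
    rw [PySem.List.pyRange_one_eq_nil (by omega)]
    simp
  | succ t ih =>
    intro ht hc
    obtain ⟨ih1, ih2, ih3⟩ := ih (by omega) (by omega)
    have hcast : ((t + 1 : Nat) : Int) = (t : Int) + 1 := by push_cast; ring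
    rw [hcast, PySem.List.pyRange_one_succ_right (by omega), List.foldl_append, List.foldl_cons,
      List.foldl_nil]
    set st := (PySem.List.pyRange 0 (t : Int)).foldl pvBody3 (arr2, cs) with hstdef
    have hv : PySem.Int.mod (PySem.List.pyGetD st.1 (t : Int) 0) 26
        = PySem.Int.mod (arr2.getD t 0) 26 := by
      rw [PySem.List.pyGetD_natCast, ih2 t (le_refl t) (by omega)]
    have hprefixlen : ((List.range t).map (fun i =>
        pvWrap (cs.getD i ' ') (PySem.Int.mod (arr2.getD i 0) 26))).length = t := by simp
    have hcslen : st.2.length = cs.length := by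
      rw [ih3]; simp; omega
    have hci : PySem.List.pyGetD st.2 (t : Int) ' ' = cs.getD t ' ' := by
      rw [PySem.List.pyGetD_natCast, ih3]
      rw [List.getD_eq_getElem?_getD, List.getElem?_append_right (by omega), hprefixlen]
      simp only [Nat.sub_self, List.getElem?_drop, Nat.add_zero]
      rw [← List.getD_eq_getElem?_getD]
    constructor
    · simp only [pvBody3, PySem.List.length_pySetD]
      exact ih1
    constructor
    · intro i hi1 hi2
      simp only [pvBody3]
      rw [PySem.List.pySetD_natCast (xs := st.1)]
      rw [getD_set_lt _ _ _ _ (by rw [ih1]; omega), if_neg (by omega), ih2 i (by omega) hi2]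
    · simp only [pvBody3]
      rw [hv, hci]
      have hwrap : ∀ w : Char, PySem.List.pySetD st.2 (t : Int) w =
          (List.range t).map (fun i => pvWrap (cs.getD i ' ') (PySem.Int.mod (arr2.getD i 0) 26))
            ++ (w :: cs.drop (t + 1)) := by
        intro w
        rw [PySem.List.pySetD_natCast, ih3, List.set_append]
        rw [if_neg (by rw [hprefixlen]; omega), hprefixlen, Nat.sub_self]
        congr 1
        rw [List.drop_eq_getElem_cons (by omega : t < cs.length), List.set_cons_zero]
      split_ifs with hgt
      · rw [hwrap]
        rw [List.range_succ, List.map_append, List.map_cons, List.map_nil, List.append_assoc]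
        simp only [List.cons_append, List.nil_append]
        congr 1
        rw [pvWrap, if_pos hgt]
      · rw [hwrap]
        rw [List.range_succ, List.map_append, List.map_cons, List.map_nil, List.append_assoc]
        simp only [List.cons_append, List.nil_append]
        congr 1
        rw [pvWrap, if_neg hgt]

theorem pvCount_split (l : List Int) (i : Int) :
    l.countP (fun v => decide (i < v)) =
      l.countP (fun v => decide (v = i + 1)) + l.countP (fun v => decide (i + 1 < v)) := by
  induction l with
  | nil => simp
  | cons x t ih =>
    simp only [List.countP_cons, ih]
    by_cases h1 : i < x <;> by_cases h2 : x = i + 1 <;> by_cases h3 : i + 1 < x <;>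
      simp [h1, h2, h3] <;> omega

theorem pvCount_zero (l : List Int) (h : ∀ v ∈ l, 0 ≤ v) :
    l.countP (fun v => decide ((0:Int) < v)) + l.countP (fun v => decide (v = 0)) = l.length := by
  induction l with
  | nil => simp
  | cons x t ih =>
    have hx := h x (by simp)
    have ht := ih (fun v hv => h v (by simp [hv]))
    simp only [List.countP_cons, List.length_cons]
    by_cases h1 : (0:Int) < x <;> by_cases h2 : x = 0 <;> simp [h1, h2] <;> omega

theorem pvS_eq (lens : List Int) (arr : List Int) (hpos : ∀ v ∈ lens, 0 ≤ v)
    (hchar : ∀ j < arr.length, arr.getD j 0 =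
      (if j = 0 then (lens.length : Int) else 0) - (lens.countP (fun v => decide (v = (j:Int))) : Int)) :
    ∀ i, i < arr.length → pvS arr i = (lens.countP (fun v => decide ((i:Int) < v)) : Int) := by
  intro i
  induction i with
  | zero =>
    intro hi
    have h0 := hchar 0 hi
    simp only [Nat.cast_zero] at h0
    have hz := pvCount_zero lens hpos
    rw [pvS, h0]
    simp only [if_true, Nat.cast_zero]
    omega
  | succ i ih =>
    intro hi
    have hs := hchar (i + 1) hi
    have hcast : ((i + 1 : Nat) : Int) = (i : Int) + 1 := by push_cast; ring
    rw [hcast] at hs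
    have hsplit := pvCount_split lens (i : Int)
    rw [pvS, ih (by omega), hs, if_neg (by omega), hcast]
    omega

theorem pvEff_cast (n x : Int) (m : Nat) (hm : (m : Int) = n + 1) (hx1 : -(n + 1) ≤ x)
    (_hx2 : x ≤ n) : ((pvIdx m x : Nat) : Int) = pvEff n x := by
  unfold pvIdx pvEff
  split_ifs <;> omega

theorem pvEff_nonneg (n x : Int) (hx1 : -(n + 1) ≤ x) : 0 ≤ pvEff n x := by
  unfold pvEff; split_ifs <;> omega

theorem pvFoldl1_length (l : List Int) : ∀ (arr : List Int), (l.foldl pvStep1 arr).length = arr.length := by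
  induction l with
  | nil => intro arr; rfl
  | cons y ys ihy =>
    intro arr
    simp only [List.foldl_cons]
    rw [ihy, pvStep1_length]

theorem pvGetD_replicate (m j : Nat) : (List.replicate m (0:Int)).getD j 0 = 0 := by
  simp [List.getD_eq_getElem?_getD, List.getElem?_replicate]
  split_ifs <;> rfl

-- A's value as the pvWrap formula over effective prefix lengths
theorem pvA_eq (s : String) (a : List Int) (n : Int) (hn : 0 < n)
    (hna : n ≤ (a.length : Int)) (hns : n ≤ (s.toList.length : Int))
    (hb : ∀ x ∈ a.take n.toNat, -(n + 1) ≤ x ∧ x ≤ n) :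
    findRollOut s a n = String.ofList ((List.range n.toNat).map (fun i =>
      pvWrap (s.toList.getD i ' ')
        (PySem.Int.mod (((a.take n.toNat).map (pvEff n)).countP (fun v => decide ((i : Int) < v)) : Int) 26))
      ++ s.toList.drop n.toNat) := by
  rw [findRollOut]
  try simp only []
  set n' := n.toNat with hn'def
  have hnn : ((n' : Nat) : Int) = n := Int.toNat_of_nonneg (by omega)
  set cs := s.toList with hcs
  set ops := a.take n' with hops
  have hopslen : ops.length = n' := by rw [hops]; simp; omega
  have hcslen : n' ≤ cs.length := by omega
  set m := (n + 1).toNat with hm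
  have hm' : m = n' + 1 := by omega
  have hb' : ∀ x ∈ ops, -(n + 1) ≤ x ∧ x ≤ n := by
    intro x hx; simp only [hops, hn'def] at hx; exact hb x hx
  have hbody1 : ∀ (acc : List Int), ∀ i ∈ PySem.List.pyRange 0 n,
      pvBody1 a acc i = pvStep1 acc (PySem.List.pyGetD ops i 0) := by
    intro acc i hi
    rw [PySem.List.mem_pyRange_one] at hi
    have hgi : PySem.List.pyGetD a i 0 = PySem.List.pyGetD ops i 0 := by
      unfold PySem.List.pyGetD
      rw [PySem.List.pyGet?_of_nonneg a hi.1, PySem.List.pyGet?_of_nonneg ops hi.1]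
      rw [hops, List.getElem?_take, if_pos (by omega)]
    calc pvBody1 a acc i = pvStep1 acc (PySem.List.pyGetD a i 0) := rfl
      _ = pvStep1 acc (PySem.List.pyGetD ops i 0) := by rw [hgi]
  have hfold1 : (PySem.List.pyRange 0 n).foldl (pvBody1 a) (List.replicate m 0)
      = ops.foldl pvStep1 (List.replicate m 0) := by
    rw [PySem.List.foldl_congr_mem _ _ _ _ hbody1]
    have hb2 : n = ((ops.length : Nat) : Int) := by rw [hopslen]; omega
    rw [hb2, PySem.List.foldl_pyRange_pyGetD' ops 0 pvStep1 _ (le_refl 0)]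
    simp
  rw [hfold1]
  set arr1 := ops.foldl pvStep1 (List.replicate m 0) with harr1
  have harr1len : arr1.length = m := by rw [harr1, pvFoldl1_length]; simp
  have hInR : ∀ x ∈ ops, PySem.Raise.InRange (List.replicate m (0:Int)).length x := by
    intro x hx
    obtain ⟨h1, h2⟩ := hb' x hx
    constructor <;> simp <;> omega
  have hchar1 : ∀ j < m, arr1.getD j 0 =
      (if j = 0 then (n : Int) else 0) - (ops.countP (fun x => pvIdx m x == j) : Int) := by
    intro j hj
    have h := pvL1 ops (List.replicate m 0) hInR (by simp; omega) j (by simp; omega)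
    simp only [List.length_replicate] at h
    rw [harr1, h, pvGetD_replicate, hopslen]
    rw [hnn]
    ring
  set lens := ops.map (pvEff n) with hlens
  have hlenslen : (lens.length : Int) = n := by rw [hlens]; simp [hopslen]; omega
  have hchar1' : ∀ j < arr1.length, arr1.getD j 0 =
      (if j = 0 then (lens.length : Int) else 0) - (lens.countP (fun v => decide (v = (j : Int))) : Int) := by
    intro j hj
    rw [harr1len] at hj
    rw [hchar1 j hj, hlenslen]
    congr 2
    rw [hlens, List.countP_map]
    apply List.countP_congr
    intro x hx
    obtain ⟨h1, h2⟩ := hb' x hx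
    have hc := pvEff_cast n x m (by omega) h1 h2
    simp only [Function.comp_apply]
    rw [← hc]
    simp
  have hpos : ∀ v ∈ lens, 0 ≤ v := by
    intro v hv
    rw [hlens] at hv
    simp only [List.mem_map] at hv
    obtain ⟨x, hx, rfl⟩ := hv
    exact pvEff_nonneg n x (hb' x hx).1
  have hS : ∀ i, i < m → pvS arr1 i = (lens.countP (fun v => decide ((i : Int) < v)) : Int) := by
    intro i hi
    exact pvS_eq lens arr1 hpos hchar1' i (by omega)
  set arr2 := (PySem.List.pyRange 1 n).foldl pvBody2 arr1 with harr2
  have harr2len : arr2.length = m := by rw [harr2, pvFoldl2_length, harr1len]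
  have hchar2 : ∀ i < n', arr2.getD i 0 = (lens.countP (fun v => decide ((i : Int) < v)) : Int) := by
    intro i hi
    have hrange : PySem.List.pyRange 1 n = PySem.List.pyRange 1 (1 + ((n' - 1 : Nat) : Int)) := by
      congr 1
      omega
    have h := pvL2 arr1 (n' - 1) (by rw [harr1len]; omega) i (by rw [harr1len]; omega)
    rw [harr2, hrange, h, if_pos (by omega)]
    exact hS i (by omega)
  have hrange0 : PySem.List.pyRange 0 n = PySem.List.pyRange 0 ((n' : Nat) : Int) := by rw [hnn]
  obtain ⟨hL41, hL42, hL43⟩ := pvL4 arr2 cs n' (by rw [harr2len]; omega) hcslen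
  rw [hrange0, hL43]
  congr 1
  congr 1
  apply List.map_congr_left
  intro i hi
  rw [List.mem_range] at hi
  rw [hchar2 i hi]

-- B-side: the inner loop bumps every position below L
theorem pvInc_length (cnt : List Int) (j : Int) : (pvInc cnt j).length = cnt.length := by
  simp [pvInc, PySem.List.length_pySetD]

theorem pvFoldlInc_length (l : List Int) : ∀ (cnt : List Int),
    (l.foldl pvInc cnt).length = cnt.length := by
  induction l with
  | nil => intro cnt; rfl
  | cons y ys ihy =>
    intro cnt
    simp only [List.foldl_cons]
    rw [ihy, pvInc_length]

theorem pvCoverNat_getD (cnt : List Int) : ∀ (t : Nat), ∀ i < cnt.length,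
    ((PySem.List.pyRange 0 (t : Int)).foldl pvInc cnt).getD i 0 =
      cnt.getD i 0 + (if (i : Int) < (t : Int) then 1 else 0) := by
  intro t
  induction t with
  | zero =>
    intro i _
    rw [PySem.List.pyRange_one_eq_nil (by omega)]
    simp only [List.foldl_nil]
    rw [if_neg (by omega)]
    ring
  | succ t ih =>
    intro i hi
    have hcast : ((t + 1 : Nat) : Int) = (t : Int) + 1 := by push_cast; ring
    rw [hcast, PySem.List.pyRange_one_succ_right (by omega), List.foldl_append, List.foldl_cons,
      List.foldl_nil]
    set r := (PySem.List.pyRange 0 (t : Int)).foldl pvInc cnt with hr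
    have hrlen : r.length = cnt.length := pvFoldlInc_length _ cnt
    rw [pvInc, PySem.List.pyGetD_natCast, PySem.List.pySetD_natCast]
    by_cases hit' : i = t
    · subst hit'
      rw [getD_set_lt _ _ _ _ (by rw [hrlen]; omega), if_pos rfl, ih i hi, if_neg (by omega),
        if_pos (by omega)]
      ring
    · by_cases ht : t < r.length
      · rw [getD_set_lt _ _ _ _ ht, if_neg (fun h => hit' h.symm), ih i hi]
        by_cases hit : (i : Int) < (t : Int)
        · rw [if_pos hit, if_pos (by omega)]
        · rw [if_neg hit, if_neg (by omega)]
      · rw [List.set_eq_of_length_le (by omega), ih i hi,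
          if_pos (by rw [hrlen] at ht; omega),
          if_pos (by rw [hrlen] at ht; omega)]

theorem pvCover_length (cnt : List Int) (L : Int) : (pvCover cnt L).length = cnt.length :=
  pvFoldlInc_length _ cnt

theorem pvCover_getD (cnt : List Int) (L : Int) (i : Nat) (hi : i < cnt.length) :
    (pvCover cnt L).getD i 0 = cnt.getD i 0 + (if (i : Int) < L then 1 else 0) := by
  by_cases hL : L ≤ 0
  · rw [pvCover, PySem.List.pyRange_one_eq_nil (by omega), List.foldl_nil, if_neg (by omega)]
    ring
  · have hcast : L = (L.toNat : Int) := by omega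
    rw [pvCover, hcast, pvCoverNat_getD cnt L.toNat i hi]

theorem pvCounts_getD (ls : List Int) : ∀ (cnt : List Int),
    ((ls.foldl pvCover cnt).length = cnt.length) ∧
    (∀ i < cnt.length, (ls.foldl pvCover cnt).getD i 0 =
      cnt.getD i 0 + (ls.countP (fun v => decide ((i : Int) < v)) : Int)) := by
  induction ls with
  | nil => intro cnt; simp
  | cons L t ih =>
    intro cnt
    obtain ⟨ih1, ih2⟩ := ih (pvCover cnt L)
    rw [pvCover_length] at ih1 ih2
    refine ⟨by simpa using ih1, ?_⟩
    intro i hi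
    rw [List.foldl_cons, ih2 i hi, pvCover_getD cnt L i hi, List.countP_cons]
    push_cast
    simp only [decide_eq_true_eq]
    split_ifs <;> ring

-- B's value as the pvWrap formula over the raw prefix lengths
theorem pvB_eq (s : String) (a : List Int) (n : Int) (hn : 0 < n) :
    findRollOut_alt s a n = String.ofList ((List.range n.toNat).map (fun i =>
      pvWrap (s.toList.getD i ' ')
        (PySem.Int.mod ((a.take n.toNat).countP (fun v => decide ((i : Int) < v)) : Int) 26))
      ++ s.toList.drop n.toNat) := by
  rw [findRollOut_alt, if_neg (by omega : ¬ n ≤ 0)]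
  try simp only []
  rw [PySem.List.slice_to a (by omega : (0:Int) ≤ n)]
  rw [PySem.List.slice_from s.toList (by omega : (0:Int) ≤ n)]
  obtain ⟨hclen, hcget⟩ := pvCounts_getD (a.take n.toNat) (List.replicate n.toNat 0)
  rw [List.length_replicate] at hclen hcget
  rw [PySem.List.foldl_append_singleton_eq_map, List.nil_append]
  congr 1
  congr 1
  rw [PySem.List.pyRange_one, List.map_map]
  simp only [Int.sub_zero]
  apply List.map_congr_left
  intro k hk
  rw [List.mem_range] at hk
  simp only [Function.comp_apply]
  have hz : (0 : Int) + (k : Int) = (k : Int) := by ring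
  rw [hz, PySem.List.pyGetD_natCast, PySem.List.pyGetD_natCast,
    hcget k hk, pvGetD_replicate, pvWrap]
  simp only [zero_add]
  set ci := s.toList.getD k ' '
  set c : Int := ((a.take n.toNat).countP (fun v => decide ((k : Int) < v)) : Int)
  by_cases h : (ci.toNat : Int) + PySem.Int.mod c 26 ≤ 122
  · rw [if_pos h, if_neg (by omega)]
  · rw [if_neg h, if_pos (by omega)]

-- outside D_, counting raw lengths = counting effective lengths
theorem pvCount_raw_eq_eff (ops : List Int) (n : Int) (i : Nat) (hn : 0 ≤ n)
    (hok : ∀ x ∈ ops, -(n + 1) ≤ x ∧ x ≤ n)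
    (hnd : ∀ x ∈ ops, ¬(x < 0 ∧ x ≠ -(n + 1))) :
    ops.countP (fun v => decide ((i : Int) < v)) =
      (ops.map (pvEff n)).countP (fun v => decide ((i : Int) < v)) := by
  rw [List.countP_map]
  apply List.countP_congr
  intro x hx
  obtain ⟨h1, _⟩ := hok x hx
  have h3 := hnd x hx
  simp only [Function.comp_apply, decide_eq_true_eq, pvEff]
  split_ifs with hneg
  · have hx0 : x = -(n + 1) := by tauto
    subst hx0
    omega
  · exact Iff.rfl

-- ===== VERDICT (by name: the statement is the Claim_ definition above) =====
theorem findRollOut_spec : Claim_equal_findRollOut := by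
  intro s a n _hdom hpre
  obtain ⟨hna, hns, hb⟩ := hpre
  unfold Spec_findRollOut
  by_cases hn : n ≤ 0
  · rw [findRollOut, findRollOut_alt, if_pos hn]
    try simp only []
    rw [PySem.List.pyRange_one_eq_nil (by omega : n ≤ 0),
      PySem.List.pyRange_one_eq_nil (by omega : n ≤ 1)]
    simp
  · have hn' : 0 < n := by omega
    have hb' : ∀ x ∈ a.take n.toNat, -(n + 1) ≤ x ∧ x ≤ n := by
      intro x hx; have := hb x hx; omega
    rw [pvA_eq s a n hn' hna hns hb', pvB_eq s a n hn']
    congr 1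
    congr 1
    apply List.map_congr_left
    intro i _
    rw [pvCount_raw_eq_eff (a.take n.toNat) n i (by omega) hb'
      (by intro x hx h; exact absurd h.1 (not_lt.2 (hb x hx).1))]
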